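-- pv_equiv track=rewrite | github.com/Arruda-03/Pesquisa-Criptografia | programa criptografia.py | fatiarInput
-- ===== SOURCE A (Python) =====
-- def fatiarInput(palavra):
--     segmentos = []
--     segmento = ''
--     alfabeto = 'abcdefghijklmnopqrstuvwxyz'
--
--     for char in palavra:
--         if char not in alfabeto:
--             continue
--         if segmento and char <= segmento[-1]:
--             segmentos.append(segmento)
--             segmento = ''
--         segmento += char
--
--     if segmento:
--         segmentos.append(segmento)
--
--     return segmentos
-- ===== SOURCE B (Python) =====
-- def _span_asc(letras, j):
--     # advance j past the maximal strictly-ascending run ending boundary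
--     while j < len(letras) and letras[j - 1] < letras[j]:
--         j += 1
--     return j
--
--
-- def fatiarInput(palavra):
--     alfabeto = 'abcdefghijklmnopqrstuvwxyz'
--     letras = [c for c in palavra if c in alfabeto]
--     segmentos = []
--     i = 0
--     while i < len(letras):
--         j = _span_asc(letras, i + 1)
--         segmentos.append(''.join(letras[i:j]))
--         i = j
--     return segmentos
-- ===== Notes on version B (the rewrite author's own statement) =====
-- stated objective: alternative
-- what changed: Replaces A's single fold that grows a segment-in-progress string by three index-based stages: filter the letters once, scan boundary indices where letras[j-1] >= letras[j], and emit each segment as a slice letras[i:j] between consecutive boundaries.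
import Mathlib
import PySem

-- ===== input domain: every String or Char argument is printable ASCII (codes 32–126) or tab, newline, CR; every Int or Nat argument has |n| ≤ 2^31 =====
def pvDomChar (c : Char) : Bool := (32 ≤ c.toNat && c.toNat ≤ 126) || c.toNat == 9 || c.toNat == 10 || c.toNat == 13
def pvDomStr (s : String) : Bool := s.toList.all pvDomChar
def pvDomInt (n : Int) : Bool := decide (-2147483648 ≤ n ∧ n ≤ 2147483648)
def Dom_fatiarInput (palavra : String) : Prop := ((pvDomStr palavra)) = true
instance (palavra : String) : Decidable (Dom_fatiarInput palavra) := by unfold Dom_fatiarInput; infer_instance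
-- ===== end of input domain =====

-- B replaces A's grow-a-segment fold by three index-based stages (filter, boundary scan by index, slicing); objective: alternative decomposition, same O(n) cost.

-- ===== PORT A =====
-- 'segmento' is kept reversed (its head is Python's segmento[-1], '+= char' is cons,
-- flushing reverses); otherwise a step-for-step transliteration of A's loop body.
def pvStepA (st : List String × List Char) (c : Char) : List String × List Char :=
  if ("abcdefghijklmnopqrstuvwxyz".toList.contains c) = false then st
  else
    match st with
    | (segs, []) => (segs, [c])
    | (segs, p :: t) =>
      if c ≤ p then (segs ++ [String.mk (p :: t).reverse], [c])
      else (segs, c :: p :: t)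

def fatiarInput (palavra : String) : List String :=
  match palavra.toList.foldl pvStepA ([], []) with
  | (segs, []) => segs
  | (segs, seg) => segs ++ [String.mk seg.reverse]

-- ===== PORT B =====
-- port of Source B's _span_asc: while j < len(letras) and letras[j-1] < letras[j]: j += 1
def pvSpanIdx (letras : List Char) (j : Nat) : Nat :=
  if h : j < letras.length ∧ (letras[j-1]?).getD ' ' < (letras[j]?).getD ' ' then
    pvSpanIdx letras (j+1)
  else j
termination_by letras.length - j
decreasing_by omega

theorem pvSpanIdx_ge (letras : List Char) (j : Nat) : j ≤ pvSpanIdx letras j := by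
  rw [pvSpanIdx]
  split
  · exact le_trans (Nat.le_succ j) (pvSpanIdx_ge letras (j+1))
  · exact Nat.le_refl j
termination_by letras.length - j
decreasing_by omega

-- port of Source B's outer while loop; letras[i:j] (0 ≤ i ≤ j) is (drop i).take (j-i), exact there
def pvLoop (letras : List Char) (segmentos : List String) (i : Nat) : List String :=
  if h : i < letras.length then
    pvLoop letras
      (segmentos ++ [String.mk ((letras.drop i).take (pvSpanIdx letras (i+1) - i))])
      (pvSpanIdx letras (i+1))
  else segmentos
termination_by letras.length - i
decreasing_by
  have := pvSpanIdx_ge letras (i+1); omega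

def fatiarInput_alt (palavra : String) : List String :=
  pvLoop (palavra.toList.filter (fun c => "abcdefghijklmnopqrstuvwxyz".toList.contains c)) [] 0

-- ===== PRECONDITION & SPEC =====
def Spec_fatiarInput (palavra : String) (out : List String) : Prop := out = fatiarInput_alt palavra
instance (palavra : String) (out : List String) : Decidable (Spec_fatiarInput palavra out) := by unfold Spec_fatiarInput; infer_instance

-- ===== CLAIM (what is proved, stated in full; the proofs are below) =====
def Claim_equal_fatiarInput : Prop := ∀ (palavra : String), Dom_fatiarInput palavra → Spec_fatiarInput palavra (fatiarInput palavra)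

-- ===== LEMMAS AND PROOFS =====

-- proof-only helpers: a clean recursive span / segmentation of the letters list
def pvSpan : List Char → Char → List Char × List Char
  | [], _ => ([], [])
  | c :: rs, anterior =>
    if c ≤ anterior then ([], c :: rs)
    else (c :: (pvSpan rs c).1, (pvSpan rs c).2)

theorem pvSpan_append (rs : List Char) (c : Char) :
    rs = (pvSpan rs c).1 ++ (pvSpan rs c).2 := by
  induction rs generalizing c with
  | nil => rfl
  | cons d rs' ih =>
    simp only [pvSpan]
    split
    · rfl
    · simpa using ih d

theorem pvSpan_snd_le (rs : List Char) (c : Char) :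
    (pvSpan rs c).2.length ≤ rs.length := by
  conv_rhs => rw [pvSpan_append rs c]
  simp

def pvCortar : List Char → List String
  | [] => []
  | c :: rs =>
    String.mk (c :: (pvSpan rs c).1) :: pvCortar (pvSpan rs c).2
termination_by l => l.length
decreasing_by
  have := pvSpan_snd_le rs c; simp; omega

-- the step function of A restricted to letters (the membership test removed)
def pvStepL (st : List String × List Char) (c : Char) : List String × List Char :=
  match st with
  | (segs, []) => (segs, [c])
  | (segs, p :: t) =>
    if c ≤ p then (segs ++ [String.mk (p :: t).reverse], [c])
    else (segs, c :: p :: t)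

def pvFinish (st : List String × List Char) : List String :=
  match st with
  | (segs, []) => segs
  | (segs, seg) => segs ++ [String.mk seg.reverse]

theorem foldA_filter (l : List Char) (st : List String × List Char) :
    l.foldl pvStepA st
      = (l.filter (fun c => "abcdefghijklmnopqrstuvwxyz".toList.contains c)).foldl pvStepL st := by
  induction l generalizing st with
  | nil => rfl
  | cons c l ih =>
    rw [List.filter_cons, List.foldl_cons]
    by_cases h : ("abcdefghijklmnopqrstuvwxyz".toList.contains c) = true
    · rw [if_pos h, List.foldl_cons, ih]
      congr 1
      unfold pvStepA pvStepL
      rw [if_neg (by intro hf; rw [hf] at h; exact absurd h (by decide))]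
    · rw [if_neg h, ih]
      congr 1
      unfold pvStepA
      rw [if_pos (Bool.eq_false_iff.mpr h)]

theorem foldL_span (rest : List Char) (p : Char) (segR : List Char) (segs : List String) :
    pvFinish (rest.foldl pvStepL (segs, p :: segR))
      = segs ++ String.mk ((p :: segR).reverse ++ (pvSpan rest p).1)
          :: pvCortar (pvSpan rest p).2 := by
  induction rest generalizing p segR segs with
  | nil => simp [pvFinish, pvSpan, pvCortar]
  | cons c rs ih =>
    by_cases h : c ≤ p
    · have hs : pvSpan (c :: rs) p = ([], c :: rs) := by
        simp [pvSpan, h]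
      simp only [List.foldl, pvStepL, if_pos h, hs, ih c [] _]
      simp [pvCortar]
    · have hs : pvSpan (c :: rs) p = (c :: (pvSpan rs c).1, (pvSpan rs c).2) := by
        simp [pvSpan, h]
      simp only [List.foldl, pvStepL, if_neg h, hs, ih c (p :: segR) segs]
      simp

theorem spanIdx_char (rs : List Char) (c : Char) (letras : List Char) (i : Nat)
    (hd : letras.drop i = c :: rs) :
    pvSpanIdx letras (i+1) = (i+1) + (pvSpan rs c).1.length := by
  induction rs generalizing c i with
  | nil =>
    have hlen : letras.length = i + 1 := by
      have := congrArg List.length hd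
      simp [List.length_drop] at this
      omega
    rw [pvSpanIdx]
    rw [dif_neg] <;> simp [pvSpan, hlen]
  | cons d rs' ih =>
    have hlen : i + 1 < letras.length := by
      have := congrArg List.length hd
      simp [List.length_drop] at this
      omega
    have hdrop1 : letras.drop (i+1) = d :: rs' := by
      have : letras.drop (i+1) = (letras.drop i).drop 1 := by
        rw [List.drop_drop]
      rw [this, hd]; rfl
    have hgi : letras[i]? = some c := by
      rw [← List.head?_drop, hd]; rfl
    have hgi1 : letras[i+1]? = some d := by
      rw [← List.head?_drop, hdrop1]; rfl
    by_cases h : c < d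
    · rw [pvSpanIdx]
      rw [dif_pos (by simp only [Nat.add_sub_cancel, hgi, hgi1, Option.getD_some]; exact ⟨hlen, h⟩)]
      rw [ih d (i+1) hdrop1]
      have hnot : ¬ d ≤ c := not_le.mpr h
      simp [pvSpan, hnot]
      omega
    · rw [pvSpanIdx]
      rw [dif_neg (by simp only [Nat.add_sub_cancel, hgi, hgi1, Option.getD_some]; exact fun hc => h hc.2)]
      have hle : d ≤ c := not_lt.mp h
      simp [pvSpan, hle]

theorem loop_eq_cortar (letras : List Char) (i : Nat) (segs : List String) :
    pvLoop letras segs i = segs ++ pvCortar (letras.drop i) := by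
  by_cases hlt : i < letras.length
  · obtain ⟨c, rs, hd⟩ : ∃ c rs, letras.drop i = c :: rs := by
      cases hdrop : letras.drop i with
      | nil =>
        exfalso
        have := congrArg List.length hdrop
        simp [List.length_drop] at this
        omega
      | cons c rs => exact ⟨c, rs, rfl⟩
    obtain ⟨a, b, hab⟩ : ∃ a b, pvSpan rs c = (a, b) := ⟨_, _, rfl⟩
    have hj := spanIdx_char rs c letras i hd
    have happ := pvSpan_append rs c
    rw [hab] at hj happ
    have hseg : (letras.drop i).take (pvSpanIdx letras (i+1) - i) = c :: a := by
      rw [hd, hj]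
      have h3 : (i + 1) + a.length - i = a.length + 1 := by omega
      rw [h3, List.take_succ_cons, happ]
      simp
    have hdropj : letras.drop (pvSpanIdx letras (i+1)) = b := by
      rw [hj]
      have h4 : letras.drop ((i+1) + a.length) = (letras.drop i).drop (a.length + 1) := by
        rw [List.drop_drop]; ring_nf
      rw [h4, hd, List.drop_succ_cons, happ]
      simp
    rw [pvLoop, dif_pos hlt, hseg, loop_eq_cortar letras (pvSpanIdx letras (i+1)) _, hdropj]
    rw [hd]
    simp [pvCortar, hab]
  · rw [pvLoop, dif_neg hlt]
    rw [List.drop_eq_nil_of_le (by omega)]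
    simp [pvCortar]
termination_by letras.length - i
decreasing_by
  have := pvSpanIdx_ge letras (i+1); omega

-- ===== VERDICT (by name: the statement is the Claim_ definition above) =====
theorem fatiarInput_spec : Claim_equal_fatiarInput := by
  intro palavra _
  unfold Spec_fatiarInput fatiarInput fatiarInput_alt
  rw [foldA_filter, loop_eq_cortar, List.drop_zero, List.nil_append]
  generalize (palavra.toList.filter fun c => ("abcdefghijklmnopqrstuvwxyz".toList.contains c)) = L
  cases L with
  | nil => simp [pvCortar]
  | cons c t =>
    show pvFinish (List.foldl pvStepL ([], [c]) t) = _
    rw [foldL_span t c [] []]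
    simp [pvCortar]
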